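-- pv_equiv track=rewrite | github.com/qdmy/detectron2 | codebase/third_party/spos_ofa/ofa/imagenet_classification/data_providers/imagenet_superclass.py | custom_label_mapping
-- ===== SOURCE A (Python) =====
-- def custom_label_mapping(classes, class_to_idx, ranges):
--     mapping_superclass = {}
--     mapping_class = {}
--     for class_name, idx in class_to_idx.items():
--         for new_idx, range_set in enumerate(ranges):
--             if idx in range_set:
--                 mapping_superclass[class_name] = new_idx
--                 mapping_class[class_name] = idx
--
--     filtered_classes = sorted(list(mapping_class.keys()))
--     return filtered_classes, mapping_class, mapping_superclass
-- ===== SOURCE B (Python) =====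
-- def custom_label_mapping(classes, class_to_idx, ranges):
--     super_of = {}
--     for new_idx, range_set in enumerate(ranges):
--         for idx in range_set:
--             super_of[idx] = new_idx
--
--     mapping_superclass = {}
--     mapping_class = {}
--     for class_name, idx in class_to_idx.items():
--         if idx in super_of:
--             mapping_superclass[class_name] = super_of[idx]
--             mapping_class[class_name] = idx
--
--     filtered_classes = sorted(mapping_class)
--     return filtered_classes, mapping_class, mapping_superclass
-- ===== Notes on version B (the rewrite author's own statement) =====
-- stated objective: faster
-- what changed: B builds a reverse index idx->last superclass index in one pass over ranges, then maps class_to_idx in a single pass, instead of A's per-class scan of every range.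
import Mathlib
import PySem

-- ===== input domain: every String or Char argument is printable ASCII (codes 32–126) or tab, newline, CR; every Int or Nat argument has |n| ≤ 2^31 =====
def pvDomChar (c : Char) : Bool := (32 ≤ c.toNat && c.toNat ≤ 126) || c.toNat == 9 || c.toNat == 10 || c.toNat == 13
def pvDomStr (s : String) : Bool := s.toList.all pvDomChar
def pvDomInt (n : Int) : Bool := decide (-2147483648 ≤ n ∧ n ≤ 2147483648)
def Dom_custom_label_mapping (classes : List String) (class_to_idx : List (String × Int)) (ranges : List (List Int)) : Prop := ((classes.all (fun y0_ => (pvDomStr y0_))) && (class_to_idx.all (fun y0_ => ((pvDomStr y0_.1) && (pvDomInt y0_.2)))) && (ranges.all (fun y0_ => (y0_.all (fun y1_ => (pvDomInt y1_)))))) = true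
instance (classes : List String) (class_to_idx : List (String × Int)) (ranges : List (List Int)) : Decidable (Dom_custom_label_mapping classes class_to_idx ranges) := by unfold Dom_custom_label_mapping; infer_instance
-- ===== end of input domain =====

-- B replaces A's per-class scan of all ranges by a reverse index idx -> last superclass index built once (faster; same values and insertion order).


-- ===== PORT A =====
def custom_label_mapping (classes : List String) (class_to_idx : List (String × Int)) (ranges : List (List Int)) : List String × (List (String × Int)) × (List (String × Int)) :=
  -- for class_name, idx in class_to_idx.items(): for new_idx, range_set in enumerate(ranges): if idx in range_set: …
  let st := class_to_idx.foldl
    (fun (st : PySem.Dict String Int × PySem.Dict String Int) p =>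
      (PySem.List.enumerate ranges 0).foldl
        (fun (st2 : PySem.Dict String Int × PySem.Dict String Int) q =>
          if p.2 ∈ q.2 then (st2.1.insert p.1 q.1, st2.2.insert p.1 p.2) else st2)
        st)
    (PySem.Dict.empty, PySem.Dict.empty)
  -- st.1 = mapping_superclass, st.2 = mapping_class
  (PySem.List.sorted st.2.keys (fun x => x) false, st.2.items, st.1.items)

-- ===== PORT B =====
-- reverse index: super_of[idx] = new_idx, later ranges overwrite (last wins)
def clmSuperOf (ranges : List (List Int)) : PySem.Dict Int Int :=
  (PySem.List.enumerate ranges 0).foldl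
    (fun d q => q.2.foldl (fun d i => d.insert i q.1) d)
    PySem.Dict.empty

def custom_label_mapping_alt (classes : List String) (class_to_idx : List (String × Int)) (ranges : List (List Int)) : List String × (List (String × Int)) × (List (String × Int)) :=
  let so := clmSuperOf ranges
  let st := class_to_idx.foldl
    (fun (st : PySem.Dict String Int × PySem.Dict String Int) p =>
      match so.get? p.2 with
      | some s => (st.1.insert p.1 s, st.2.insert p.1 p.2)
      | none => st)
    (PySem.Dict.empty, PySem.Dict.empty)
  (PySem.List.sorted st.2.keys (fun x => x) false, st.2.items, st.1.items)

-- ===== PRECONDITION & SPEC =====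
def Spec_custom_label_mapping (classes : List String) (class_to_idx : List (String × Int)) (ranges : List (List Int)) (out : List String × (List (String × Int)) × (List (String × Int))) : Prop := out = custom_label_mapping_alt classes class_to_idx ranges
instance (classes : List String) (class_to_idx : List (String × Int)) (ranges : List (List Int)) (out : List String × (List (String × Int)) × (List (String × Int))) : Decidable (Spec_custom_label_mapping classes class_to_idx ranges out) := by unfold Spec_custom_label_mapping; infer_instance

-- ===== CLAIM (what is proved, stated in full; the proofs are below) =====
def Claim_equal_custom_label_mapping : Prop := ∀ (classes : List String) (class_to_idx : List (String × Int)) (ranges : List (List Int)), Dom_custom_label_mapping classes class_to_idx ranges → Spec_custom_label_mapping classes class_to_idx ranges (custom_label_mapping classes class_to_idx ranges)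

-- ===== LEMMAS AND PROOFS =====

-- proof-side bridge: the last new_idx whose range contains idx, scanning enumerated ranges
def clmLastHit : List (Int × List Int) → Int → Option Int
  | [], _ => none
  | q :: rest, idx =>
    match clmLastHit rest idx with
    | some s => some s
    | none => if idx ∈ q.2 then some q.1 else none

lemma clm_inner_get (l : List Int) (v idx : Int) (d : PySem.Dict Int Int) :
    (l.foldl (fun d i => d.insert i v) d).get? idx
      = if idx ∈ l then some v else d.get? idx := by
  induction l generalizing d with
  | nil => simp
  | cons x xs ih =>
    simp only [List.foldl_cons, ih, List.mem_cons]
    by_cases hx : idx ∈ xs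
    · simp [hx]
    · by_cases he : idx = x
      · simp [he, PySem.Dict.get?_insert_self]
      · simp [hx, he, PySem.Dict.get?_insert_of_ne _ _ he]

lemma clm_build_get (es : List (Int × List Int)) (idx : Int) (d : PySem.Dict Int Int) :
    (es.foldl (fun d q => q.2.foldl (fun d i => d.insert i q.1) d) d).get? idx
      = match clmLastHit es idx with
        | some s => some s
        | none => d.get? idx := by
  induction es generalizing d with
  | nil => simp [clmLastHit]
  | cons q rest ih =>
    simp only [List.foldl_cons, ih, clmLastHit, clm_inner_get]
    cases clmLastHit rest idx with
    | some s => simp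
    | none =>
      by_cases hm : idx ∈ q.2 <;> simp [hm]

lemma clm_A_inner (es : List (Int × List Int)) (name : String) (idx : Int)
    (st : PySem.Dict String Int × PySem.Dict String Int) :
    es.foldl
        (fun st2 q => if idx ∈ q.2 then (st2.1.insert name q.1, st2.2.insert name idx) else st2)
        st
      = match clmLastHit es idx with
        | some s => (st.1.insert name s, st.2.insert name idx)
        | none => st := by
  induction es generalizing st with
  | nil => simp [clmLastHit]
  | cons q rest ih =>
    simp only [List.foldl_cons, ih, clmLastHit]
    cases hr : clmLastHit rest idx with
    | some s =>
      by_cases hm : idx ∈ q.2 <;>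
        simp [hm, PySem.Dict.insert_insert_self]
    | none =>
      by_cases hm : idx ∈ q.2 <;> simp [hm]

lemma clm_superOf_get (ranges : List (List Int)) (idx : Int) :
    (clmSuperOf ranges).get? idx = clmLastHit (PySem.List.enumerate ranges 0) idx := by
  unfold clmSuperOf
  rw [clm_build_get]
  cases clmLastHit (PySem.List.enumerate ranges 0) idx <;> simp

-- ===== VERDICT (by name: the statement is the Claim_ definition above) =====
theorem custom_label_mapping_spec : Claim_equal_custom_label_mapping := by
  intro classes class_to_idx ranges _
  unfold Spec_custom_label_mapping custom_label_mapping custom_label_mapping_alt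
  have hfun :
      (fun (st : PySem.Dict String Int × PySem.Dict String Int) (p : String × Int) =>
        (PySem.List.enumerate ranges 0).foldl
          (fun st2 q => if p.2 ∈ q.2 then (st2.1.insert p.1 q.1, st2.2.insert p.1 p.2) else st2)
          st)
    = (fun (st : PySem.Dict String Int × PySem.Dict String Int) (p : String × Int) =>
        match (clmSuperOf ranges).get? p.2 with
        | some s => (st.1.insert p.1 s, st.2.insert p.1 p.2)
        | none => st) := by
    funext st p
    rw [clm_A_inner, clm_superOf_get]
  rw [hfun]
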